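-- pv_equiv track=rewrite | github.com/sunnyhxu/Matroid10 | python/hvec_extract.py | h_from_f_vector
-- ===== SOURCE A (Python) =====
-- from math import comb
-- from typing import Any, Dict, List
--
-- def h_from_f_vector(f_vector: List[int], rank: int) -> List[int]:
--     # Matroid.f_vector() returns counts of independent sets by size:
--     # [f_0, f_1, ..., f_rank], where f_0 = 1 for the empty set.
--     f = [int(x) for x in f_vector]
--     if not f:
--         f = [1]
--     out: List[int] = []
--     for i in range(rank + 1):
--         total = 0
--         for j in range(i + 1):
--             fj = f[j] if j < len(f) else 0
--             total += ((-1) ** (i - j)) * comb(rank - j, i - j) * fj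
--         out.append(int(total))
--     return out
-- ===== SOURCE B (Python) =====
-- def h_from_f_vector(f_vector, rank):
--     # Horner/synthetic-shift scheme: build sum_j f_j * (x-1)^(rank-j) coefficient-wise
--     # (descending powers), no binomial coefficients at all.
--     f = [int(x) for x in f_vector] or [1]
--     h = []
--     for j in range(rank + 1):
--         fj = f[j] if j < len(f) else 0
--         h = [a - b for a, b in zip(h + [0], [0] + h)]   # h := h * (x - 1), one degree higher
--         h[-1] += fj                                     # h := h + f_j
--     return h
-- ===== Notes on version B (the rewrite author's own statement) =====
-- stated objective: faster
-- what changed: Replaces the double sum of signed binomial coefficients (comb recomputed from scratch per term) by a Horner/synthetic-shift scheme that builds sum_j f_j*(x-1)^(rank-j) coefficient-wise, so all binomial arithmetic disappears and each step is one big-int subtraction.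
import Mathlib
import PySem

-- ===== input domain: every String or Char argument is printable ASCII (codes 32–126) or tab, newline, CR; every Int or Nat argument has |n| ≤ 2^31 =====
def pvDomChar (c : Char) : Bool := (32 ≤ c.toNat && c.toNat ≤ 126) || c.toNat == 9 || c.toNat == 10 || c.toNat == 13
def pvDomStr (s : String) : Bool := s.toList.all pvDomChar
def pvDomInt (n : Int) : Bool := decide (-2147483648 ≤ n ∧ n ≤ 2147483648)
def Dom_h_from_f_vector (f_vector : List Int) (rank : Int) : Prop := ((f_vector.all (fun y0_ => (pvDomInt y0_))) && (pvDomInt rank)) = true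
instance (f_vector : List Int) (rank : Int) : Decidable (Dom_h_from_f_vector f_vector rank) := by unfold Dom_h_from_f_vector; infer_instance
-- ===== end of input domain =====

-- B replaces the double sum of signed binomials by a Horner/synthetic-shift scheme
-- building sum_j f_j*(x-1)^(rank-j) coefficient-wise (objective: faster, measured).

-- ===== PORT A =====
-- math.comb as used by A: always called with 0 ≤ i-j ≤ rank-j, where it is Nat.choose
def pvComb (n k : Int) : Int := (n.toNat.choose k.toNat : Int)

def h_from_f_vector (f_vector : List Int) (rank : Int) : List Int :=
  let f := if f_vector = [] then [1] else f_vector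
  (PySem.List.pyRange 0 (rank + 1) 1).foldl
    (fun out i =>
      out ++ [(PySem.List.pyRange 0 (i + 1) 1).foldl
        (fun total j =>
          total + (-1 : Int) ^ (i - j).toNat * pvComb (rank - j) (i - j) *
            (if j < (f.length : Int) then PySem.List.pyGetD f j 0 else 0)) 0]) []

-- ===== PORT B =====
-- '[a - b for a, b in zip(h + [0], [0] + h)]'
def pvMulXm1 (h : List Int) : List Int :=
  List.zipWith (fun a b => a - b) (h ++ [0]) (0 :: h)

-- 'h[-1] += v' on the (always nonempty) list h
def pvBumpLast (h : List Int) (v : Int) : List Int :=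
  h.dropLast ++ [h.getLastD 0 + v]

def h_from_f_vector_alt (f_vector : List Int) (rank : Int) : List Int :=
  let f := if f_vector = [] then [1] else f_vector
  (PySem.List.pyRange 0 (rank + 1) 1).foldl
    (fun h j =>
      pvBumpLast (pvMulXm1 h)
        (if j < (f.length : Int) then PySem.List.pyGetD f j 0 else 0)) []

-- ===== PRECONDITION & SPEC =====
def Spec_h_from_f_vector (f_vector : List Int) (rank : Int) (out : List Int) : Prop := out = h_from_f_vector_alt f_vector rank
instance (f_vector : List Int) (rank : Int) (out : List Int) : Decidable (Spec_h_from_f_vector f_vector rank out) := by unfold Spec_h_from_f_vector; infer_instance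

-- ===== CLAIM (what is proved, stated in full; the proofs are below) =====
def Claim_equal_h_from_f_vector : Prop := ∀ (f_vector : List Int) (rank : Int), Dom_h_from_f_vector f_vector rank → Spec_h_from_f_vector f_vector rank (h_from_f_vector f_vector rank)

-- ===== LEMMAS AND PROOFS =====

-- f[j] if j < len(f) else 0, at a Nat index
def pvFJ (f : List Int) (j : Nat) : Int :=
  if (j : Int) < (f.length : Int) then PySem.List.pyGetD f (j : Int) 0 else 0

-- the closed form both programs compute: h_i of row r
def pvG (f : List Int) (r i : Nat) : Int :=
  ∑ j ∈ Finset.range (i + 1), (-1 : Int) ^ (i - j) * ((r - j).choose (i - j) : Int) * pvFJ f j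

def pvRow (f : List Int) (r : Nat) : List Int := (List.range (r + 1)).map (pvG f r)

lemma pv_sum_map_range (t : Nat → Int) (n : Nat) :
    ((List.range n).map t).sum = ∑ j ∈ Finset.range n, t j := by
  induction n with
  | zero => simp
  | succ n ih => simp [List.range_succ, Finset.sum_range_succ, ih]

lemma pvG_zero (f : List Int) (r : Nat) : pvG f r 0 = pvFJ f 0 := by
  simp [pvG]

lemma pvG_step (f : List Int) (r k : Nat) (hk : k + 1 ≤ r) :
    pvG f (r + 1) (k + 1) = pvG f r (k + 1) - pvG f r k := by
  unfold pvG
  rw [Finset.sum_range_succ, Finset.sum_range_succ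
    (fun j => (-1 : Int) ^ (k + 1 - j) * ((r - j).choose (k + 1 - j) : Int) * pvFJ f j)]
  have hl1 : (-1 : Int) ^ (k + 1 - (k + 1)) * ((r + 1 - (k + 1)).choose (k + 1 - (k + 1)) : Int) *
      pvFJ f (k + 1) = pvFJ f (k + 1) := by simp
  have hl2 : (-1 : Int) ^ (k + 1 - (k + 1)) * ((r - (k + 1)).choose (k + 1 - (k + 1)) : Int) *
      pvFJ f (k + 1) = pvFJ f (k + 1) := by simp
  rw [hl1, hl2]
  have hsum : ∑ j ∈ Finset.range (k + 1),
        (-1 : Int) ^ (k + 1 - j) * ((r + 1 - j).choose (k + 1 - j) : Int) * pvFJ f j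
      = ∑ j ∈ Finset.range (k + 1),
        ((-1 : Int) ^ (k + 1 - j) * ((r - j).choose (k + 1 - j) : Int) * pvFJ f j
          - (-1 : Int) ^ (k - j) * ((r - j).choose (k - j) : Int) * pvFJ f j) := by
    apply Finset.sum_congr rfl
    intro j hj
    have hjk : j ≤ k := by
      have := Finset.mem_range.mp hj; omega
    have h1 : r + 1 - j = (r - j) + 1 := by omega
    have h2 : k + 1 - j = (k - j) + 1 := by omega
    rw [h1, h2, Nat.choose_succ_succ]
    push_cast
    ring
  rw [hsum, Finset.sum_sub_distrib]
  ring

lemma pvG_top (f : List Int) (r : Nat) :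
    pvG f (r + 1) (r + 1) = pvFJ f (r + 1) - pvG f r r := by
  unfold pvG
  rw [Finset.sum_range_succ]
  have hl : (-1 : Int) ^ (r + 1 - (r + 1)) * ((r + 1 - (r + 1)).choose (r + 1 - (r + 1)) : Int) *
      pvFJ f (r + 1) = pvFJ f (r + 1) := by simp
  rw [hl]
  have hsum : ∑ j ∈ Finset.range (r + 1),
        (-1 : Int) ^ (r + 1 - j) * ((r + 1 - j).choose (r + 1 - j) : Int) * pvFJ f j
      = ∑ j ∈ Finset.range (r + 1),
        -((-1 : Int) ^ (r - j) * ((r - j).choose (r - j) : Int) * pvFJ f j) := by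
    apply Finset.sum_congr rfl
    intro j hj
    have hjr : j ≤ r := by
      have := Finset.mem_range.mp hj; omega
    have h1 : r + 1 - j = (r - j) + 1 := by omega
    rw [h1, Nat.choose_self, Nat.choose_self]
    push_cast
    ring
  rw [hsum, Finset.sum_neg_distrib]
  ring

lemma pvMulXm1_row (f : List Int) (r : Nat) :
    pvMulXm1 (pvRow f r) = (List.range (r + 1)).map (pvG f (r + 1)) ++ [-(pvG f r r)] := by
  apply List.ext_getElem
  · simp [pvMulXm1, pvRow]
  intro i h1 h2
  have hrow : (pvRow f r).length = r + 1 := by simp [pvRow]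
  have hi2 : i < r + 2 := by
    have h1' := h1
    simp only [pvMulXm1, pvRow, List.length_zipWith, List.length_append, List.length_cons,
      List.length_map, List.length_range] at h1'
    omega
  simp only [pvMulXm1]
  rw [List.getElem_zipWith]
  rcases Nat.lt_or_ge i (r + 1) with hi | hi
  · rw [List.getElem_append_left (by simp [pvRow]; omega),
        List.getElem_append_left (by simp [pvRow]; omega)]
    cases i with
    | zero =>
        simp [pvRow, pvG_zero]
    | succ k =>
        rw [List.getElem_cons_succ]
        simp only [pvRow, List.getElem_map, List.getElem_range]
        exact (pvG_step f r k (by omega)).symm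
  · have hi' : i = r + 1 := by omega
    subst hi'
    rw [List.getElem_append_right (by simp [pvRow]),
        List.getElem_append_right (by simp)]
    rw [List.getElem_cons_succ]
    simp only [pvRow, List.length_map, List.length_range, List.getElem_map, List.getElem_range]
    simp

lemma pv_step_row (f : List Int) (r : Nat) :
    pvBumpLast (pvMulXm1 (pvRow f r)) (pvFJ f (r + 1)) = pvRow f (r + 1) := by
  rw [pvMulXm1_row, pvBumpLast, List.dropLast_concat, List.getLastD_concat]
  have h : -(pvG f r r) + pvFJ f (r + 1) = pvG f (r + 1) (r + 1) := by
    rw [pvG_top]; ring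
  rw [h]
  simp [pvRow, List.range_succ]

lemma pvA_fold (f : List Int) (R : Nat) :
    (PySem.List.pyRange 0 ((R : Int) + 1) 1).foldl
      (fun out i =>
        out ++ [(PySem.List.pyRange 0 (i + 1) 1).foldl
          (fun total j =>
            total + (-1 : Int) ^ (i - j).toNat * pvComb ((R : Int) - j) (i - j) *
              (if j < (f.length : Int) then PySem.List.pyGetD f j 0 else 0)) 0]) []
    = pvRow f R := by
  have h1 : ((R : Int) + 1) = ((R + 1 : Nat) : Int) := by push_cast; ring
  rw [h1, PySem.List.pyRange_zero_nat, PySem.List.foldl_append_singleton_eq_map,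
    List.map_map, List.nil_append, pvRow]
  apply List.map_congr_left
  intro iN hiN
  have hiR : iN ≤ R := by
    have := List.mem_range.mp hiN; omega
  show (PySem.List.pyRange 0 ((iN : Int) + 1) 1).foldl
      (fun total j =>
        total + (-1 : Int) ^ ((iN : Int) - j).toNat * pvComb ((R : Int) - j) ((iN : Int) - j) *
          (if j < (f.length : Int) then PySem.List.pyGetD f j 0 else 0)) 0 = pvG f R iN
  have h2 : ((iN : Int) + 1) = ((iN + 1 : Nat) : Int) := by push_cast; ring
  rw [PySem.List.foldl_add, h2, PySem.List.pyRange_zero_nat, List.map_map,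
    pv_sum_map_range, pvG]
  rw [Int.zero_add]
  apply Finset.sum_congr rfl
  intro j hj
  have hji : j ≤ iN := by
    have := Finset.mem_range.mp hj; omega
  show (-1 : Int) ^ ((iN : Int) - (j : Int)).toNat * pvComb ((R : Int) - (j : Int)) ((iN : Int) - (j : Int)) *
      (if (j : Int) < (f.length : Int) then PySem.List.pyGetD f (j : Int) 0 else 0)
    = (-1 : Int) ^ (iN - j) * ((R - j).choose (iN - j) : Int) * pvFJ f j
  have e1 : ((iN : Int) - (j : Int)).toNat = iN - j := by omega
  have e2 : pvComb ((R : Int) - (j : Int)) ((iN : Int) - (j : Int)) = ((R - j).choose (iN - j) : Int) := by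
    unfold pvComb
    rw [show ((R : Int) - (j : Int)).toNat = R - j by omega,
        show ((iN : Int) - (j : Int)).toNat = iN - j by omega]
  rw [e1, e2, pvFJ]

lemma pvB_fold (f : List Int) (R : Nat) :
    (PySem.List.pyRange 0 ((R : Int) + 1) 1).foldl
      (fun h j =>
        pvBumpLast (pvMulXm1 h)
          (if j < (f.length : Int) then PySem.List.pyGetD f j 0 else 0)) []
    = pvRow f R := by
  induction R with
  | zero =>
      rw [show ((0 : Nat) : Int) + 1 = 0 + 1 by norm_num, PySem.List.pyRange_one_singleton]
      show pvBumpLast (pvMulXm1 [])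
          (if (0 : Int) < (f.length : Int) then PySem.List.pyGetD f 0 0 else 0) = pvRow f 0
      have : (if (0 : Int) < (f.length : Int) then PySem.List.pyGetD f 0 0 else 0) = pvFJ f 0 := by
        rw [pvFJ]; norm_num
      rw [this]
      simp [pvMulXm1, pvBumpLast, pvRow, pvG_zero]
  | succ R ih =>
      have hcast : ((R + 1 : Nat) : Int) + 1 = ((R : Int) + 1) + 1 := by push_cast; ring
      rw [hcast, PySem.List.pyRange_one_succ_right (by positivity), List.foldl_append, ih]
      show pvBumpLast (pvMulXm1 (pvRow f R))
          (if ((R : Int) + 1) < (f.length : Int) then PySem.List.pyGetD f ((R : Int) + 1) 0 else 0)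
        = pvRow f (R + 1)
      have : (if ((R : Int) + 1) < (f.length : Int) then PySem.List.pyGetD f ((R : Int) + 1) 0 else 0)
          = pvFJ f (R + 1) := by
        rw [pvFJ]; push_cast; ring_nf
      rw [this, pv_step_row]

lemma pvA_closed (f_vector : List Int) (R : Nat) :
    h_from_f_vector f_vector (R : Int) = pvRow (if f_vector = [] then [1] else f_vector) R := by
  exact pvA_fold (if f_vector = [] then [1] else f_vector) R

lemma pvB_closed (f_vector : List Int) (R : Nat) :
    h_from_f_vector_alt f_vector (R : Int) = pvRow (if f_vector = [] then [1] else f_vector) R := by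
  exact pvB_fold (if f_vector = [] then [1] else f_vector) R

-- ===== VERDICT (by name: the statement is the Claim_ definition above) =====
theorem h_from_f_vector_spec : Claim_equal_h_from_f_vector := by
  intro f_vector rank _
  unfold Spec_h_from_f_vector
  by_cases hr : 0 ≤ rank
  · obtain ⟨R, rfl⟩ := Int.eq_ofNat_of_zero_le hr
    rw [pvA_closed, pvB_closed]
  · have h : rank + 1 ≤ 0 := by omega
    simp only [h_from_f_vector, h_from_f_vector_alt, PySem.List.pyRange_one_eq_nil h,
      List.foldl_nil]
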